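-- pv_equiv track=rewrite | github.com/wys-prog/lipon | liponc.py | tokenise_line
-- ===== SOURCE A (Python) =====
-- def tokenise_line(line: str) -> list[str]:
--     tokens: list[str] = []
--     current = ""
--     in_string = False
--     i = 0
--     while i < len(line):
--         ch = line[i]
--         if ch == ';' and not in_string:
--             break
--         if ch == '"':
--             if in_string:
--                 current += ch
--                 tokens.append(current)
--                 current = ""
--                 in_string = False
--             else:
--                 if current.strip():
--                     tokens.append(current.strip())
--                 current = ch
--                 in_string = True
--         elif ch in (' ', '\t', ',') and not in_string:
--             if current.strip():
--                 tokens.append(current.strip())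
--                 current = ""
--         else:
--             current += ch
--         i += 1
--     if current.strip():
--         tokens.append(current.strip())
--     return tokens
-- ===== SOURCE B (Python) =====
-- def tokenise_line(line: str) -> list[str]:
--     tokens: list[str] = []
--     i, n = 0, len(line)
--     while i < n:
--         ch = line[i]
--         if ch == ';':
--             break
--         if ch in ' \t,':
--             i += 1
--         elif ch == '"':
--             j = line.find('"', i + 1)
--             if j == -1:
--                 tokens.append(line[i:].strip())
--                 break
--             tokens.append(line[i:j + 1])
--             i = j + 1
--         else:
--             j = i
--             while j < n and line[j] not in ' \t,";':
--                 j += 1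
--             t = line[i:j].strip()
--             if t:
--                 tokens.append(t)
--             i = j
--     return tokens
-- ===== Notes on version B (the rewrite author's own statement) =====
-- stated objective: faster
-- what changed: Replaced A's char-by-char state machine (a `current` buffer grown by string concatenation plus an in_string flag) with a token-at-a-time scanner that finds each closing quote with str.find or scans the whole bareword run and slices the token out in one step.
import Mathlib
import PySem

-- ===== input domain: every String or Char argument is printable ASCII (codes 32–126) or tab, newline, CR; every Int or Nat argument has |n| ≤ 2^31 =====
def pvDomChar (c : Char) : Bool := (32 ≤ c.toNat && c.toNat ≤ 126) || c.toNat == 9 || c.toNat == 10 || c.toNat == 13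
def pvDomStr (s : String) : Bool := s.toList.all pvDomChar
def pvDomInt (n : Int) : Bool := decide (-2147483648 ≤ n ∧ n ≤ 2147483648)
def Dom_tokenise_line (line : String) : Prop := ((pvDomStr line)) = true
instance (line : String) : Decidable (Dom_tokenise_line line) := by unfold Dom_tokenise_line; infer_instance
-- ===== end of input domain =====

-- B replaces A's char-by-char state machine by a token-at-a-time scanner that slices each token out in one step (measurably faster in Python: no per-char buffer concatenation).

-- ===== PORT A =====
-- A's while loop over the characters, with state (tokens, current, in_string); the ';' break
-- falls through to the final flush of current.strip().
def tokeniseA : List Char → List (List Char) → List Char → Bool → List (List Char)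
  | [], tokens, current, _ =>
      if PySem.Chars.strip current ≠ [] then tokens ++ [PySem.Chars.strip current] else tokens
  | ch :: rest, tokens, current, instr =>
      if ch = ';' ∧ instr = false then
        -- break, then the final flush
        if PySem.Chars.strip current ≠ [] then tokens ++ [PySem.Chars.strip current] else tokens
      else if ch = '"' then
        if instr then tokeniseA rest (tokens ++ [current ++ [ch]]) [] false
        else if PySem.Chars.strip current ≠ [] then
          tokeniseA rest (tokens ++ [PySem.Chars.strip current]) [ch] true
        else tokeniseA rest tokens [ch] true
      else if (ch = ' ' ∨ ch = '\t' ∨ ch = ',') ∧ instr = false then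
        if PySem.Chars.strip current ≠ [] then
          tokeniseA rest (tokens ++ [PySem.Chars.strip current]) [] false
        else tokeniseA rest tokens current instr
      else tokeniseA rest tokens (current ++ [ch]) instr

def tokenise_line (line : String) : List String :=
  (tokeniseA line.toList [] [] false).map String.mk

-- ===== PORT B =====
def pvWordChar (c : Char) : Bool := !(c == ' ' || c == '\t' || c == ',' || c == '"' || c == ';')

-- B's scanner: skip separators; at ';' stop; at '"' find the closing quote (the two takeWhile/dropWhile
-- calls are line.find('"', i+1) plus the slices); otherwise slice out the whole bareword run.
def tokeniseB : List Char → List (List Char)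
  | [] => []
  | ch :: rest =>
      if ch = ';' then []
      else if ch = ' ' ∨ ch = '\t' ∨ ch = ',' then tokeniseB rest
      else if ch = '"' then
        match h : rest.dropWhile (fun c => c != '"') with
        | [] => [PySem.Chars.strip (ch :: rest.takeWhile (fun c => c != '"'))]
        | _ :: after => (ch :: rest.takeWhile (fun c => c != '"') ++ ['"']) :: tokeniseB after
      else
        let t := PySem.Chars.strip (ch :: rest.takeWhile pvWordChar)
        (if t ≠ [] then [t] else []) ++ tokeniseB (rest.dropWhile pvWordChar)
termination_by cs => cs.length
decreasing_by
  · simp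
  · have := List.length_dropWhile_le (p := fun c => c != '"') rest
    simp_all; omega
  · have := List.length_dropWhile_le (p := pvWordChar) rest
    simp; omega

def tokenise_line_alt (line : String) : List String :=
  (tokeniseB line.toList).map String.mk

-- ===== PRECONDITION & SPEC =====
def Spec_tokenise_line (line : String) (out : List String) : Prop := out = tokenise_line_alt line
instance (line : String) (out : List String) : Decidable (Spec_tokenise_line line out) := by unfold Spec_tokenise_line; infer_instance

-- ===== CLAIM (what is proved, stated in full; the proofs are below) =====
def Claim_equal_tokenise_line : Prop := ∀ (line : String), Dom_tokenise_line line → Spec_tokenise_line line (tokenise_line line)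

-- ===== LEMMAS AND PROOFS =====

-- emit a stripped buffer iff it is non-empty (A's `if current.strip(): tokens.append(...)`)
def pvEmit (t : List Char) : List (List Char) := if t ≠ [] then [t] else []

-- what A produces from string mode onwards, phrased in B's shape
def pvStrTail (cur : List Char) (cs : List Char) : List (List Char) :=
  match cs.dropWhile (fun c => c != '"') with
  | [] => pvEmit (PySem.Chars.strip (cur ++ cs.takeWhile (fun c => c != '"')))
  | _ :: after => (cur ++ cs.takeWhile (fun c => c != '"') ++ ['"']) :: tokeniseB after

theorem pvStrip_eq_nil_iff (l : List Char) :
    PySem.Chars.strip l = [] ↔ ∀ c ∈ l, PySem.Chars.isspace c = true := by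
  simp only [PySem.Chars.strip, PySem.Chars.lstrip, PySem.Chars.rstrip,
    List.reverse_eq_nil_iff, List.dropWhile_eq_nil_iff, List.mem_reverse]
  constructor
  · intro h c hc
    by_cases hmem : c ∈ List.dropWhile PySem.Chars.isspace l
    · exact h c hmem
    · have hl := (List.takeWhile_append_dropWhile (p := PySem.Chars.isspace) (l := l)).symm
      rw [hl, List.mem_append] at hc
      rcases hc with hc | hc
      · exact List.mem_takeWhile_imp hc
      · exact absurd hc hmem
  · intro h c hc
    exact h c (List.Sublist.mem hc (List.dropWhile_sublist _))

theorem pvStrip_append_of_nil {a : List Char} (h : PySem.Chars.strip a = []) (b : List Char) :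
    PySem.Chars.strip (a ++ b) = PySem.Chars.strip b := by
  have ha : List.dropWhile PySem.Chars.isspace a = [] :=
    List.dropWhile_eq_nil_iff.mpr (fun c hc => (pvStrip_eq_nil_iff a).mp h c hc)
  simp [PySem.Chars.strip, PySem.Chars.lstrip, List.dropWhile_append, ha]

theorem pvStrip_quote_ne_nil (cur tw : List Char) (h : '"' ∈ cur) :
    PySem.Chars.strip (cur ++ tw) ≠ [] := by
  intro hnil
  rw [pvStrip_eq_nil_iff] at hnil
  have := hnil '"' (List.mem_append_left _ h)
  simp [PySem.Chars.isspace] at this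

-- B's one-token step law
theorem tokeniseB_step (cs : List Char) :
    tokeniseB cs = pvEmit (PySem.Chars.strip (cs.takeWhile pvWordChar)) ++ tokeniseB (cs.dropWhile pvWordChar) := by
  match cs with
  | [] => simp [tokeniseB, pvEmit, PySem.Chars.strip, PySem.Chars.lstrip, PySem.Chars.rstrip]
  | ch :: rest =>
    by_cases hw : pvWordChar ch = true
    · simp only [pvWordChar, Bool.not_eq_eq_eq_not, Bool.not_true, Bool.or_eq_false_iff,
        beq_eq_false_iff_ne, ne_eq] at hw
      obtain ⟨⟨⟨⟨hs1, hs2⟩, hs3⟩, hq⟩, hsc⟩ := hw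
      have hw' : pvWordChar ch = true := by simp [pvWordChar, hs1, hs2, hs3, hq, hsc]
      simp only [tokeniseB, hsc, hs1, hs2, hs3, hq, or_self, if_false, List.takeWhile_cons,
        List.dropWhile_cons, hw', if_true, pvEmit, false_or, or_false]
    · have hn : pvWordChar ch = false := by simpa using hw
      have : (ch :: rest).takeWhile pvWordChar = [] := by simp [List.takeWhile_cons, hn]
      have hd : (ch :: rest).dropWhile pvWordChar = ch :: rest := by simp [List.dropWhile_cons, hn]
      rw [this, hd]
      simp [pvEmit, PySem.Chars.strip, PySem.Chars.lstrip, PySem.Chars.rstrip]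

theorem pvStrTail_quote (rest : List Char) :
    pvStrTail ['"'] rest = tokeniseB ('"' :: rest) := by
  rw [pvStrTail, tokeniseB]
  simp only [reduceIte, reduceCtorEq, or_self, or_false, false_or]
  match h : rest.dropWhile (fun c => c != '"') with
  | [] =>
    have hne := pvStrip_quote_ne_nil ['"'] (rest.takeWhile (fun c => c != '"')) (by simp)
    simp only [List.singleton_append] at hne
    simp [pvEmit, hne]
  | q :: after => simp

theorem pvFlush (tokens : List (List Char)) (t : List Char) :
    (if t ≠ [] then tokens ++ [t] else tokens) = tokens ++ pvEmit t := by
  unfold pvEmit; split_ifs <;> simp_all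

theorem pvWordChar_sep_false {ch : Char} (h : ch = ';' ∨ ch = '"' ∨ ch = ' ' ∨ ch = '\t' ∨ ch = ',') :
    pvWordChar ch = false := by
  rcases h with h | h | h | h | h <;> subst h <;> decide

theorem pvStrTail_cons {ch : Char} (h : ¬ ch = '"') (cur rest : List Char) :
    pvStrTail cur (ch :: rest) = pvStrTail (cur ++ [ch]) rest := by
  have hp : (ch != '"') = true := by simpa using h
  rw [pvStrTail, pvStrTail, List.dropWhile_cons, List.takeWhile_cons, hp]
  simp only [if_true]
  match List.dropWhile (fun c => c != '"') rest with
  | [] => simp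
  | q :: after => simp

theorem pvMain : ∀ n cs, cs.length ≤ n →
    (∀ tokens cur, (∀ c ∈ cur, pvWordChar c = true) →
      tokeniseA cs tokens cur false =
        tokens ++ pvEmit (PySem.Chars.strip (cur ++ cs.takeWhile pvWordChar))
               ++ tokeniseB (cs.dropWhile pvWordChar)) ∧
    (∀ tokens cur, tokeniseA cs tokens cur true = tokens ++ pvStrTail cur cs) := by
  intro n
  induction n with
  | zero =>
    intro cs hlen
    have hnil : cs = [] := List.eq_nil_of_length_eq_zero (Nat.le_zero.mp hlen)
    subst hnil
    refine ⟨fun tokens cur _ => ?_, fun tokens cur => ?_⟩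
    · rw [tokeniseA, pvFlush]; simp [tokeniseB]
    · rw [tokeniseA, pvFlush, pvStrTail]; simp
  | succ n ih =>
    intro cs hlen
    match cs with
    | [] =>
      refine ⟨fun tokens cur _ => ?_, fun tokens cur => ?_⟩
      · rw [tokeniseA, pvFlush]; simp [tokeniseB]
      · rw [tokeniseA, pvFlush, pvStrTail]; simp
    | ch :: rest =>
      have hr : rest.length ≤ n := by simp at hlen; omega
      refine ⟨fun tokens cur hcur => ?_, fun tokens cur => ?_⟩
      · -- instr = false
        by_cases hsemi : ch = ';'
        · subst hsemi
          rw [tokeniseA, if_pos (show (';' = ';' ∧ (false : Bool) = false) from ⟨rfl, rfl⟩),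
            pvFlush]
          rw [tokeniseB.eq_def]
          simp [show pvWordChar ';' = false from rfl]
        · by_cases hq : ch = '"'
          · subst hq
            rw [tokeniseA, if_neg (by simp [hsemi]), if_pos rfl]
            simp only [Bool.false_eq_true, if_false]
            have h2 := (ih rest hr).2
            by_cases hne : PySem.Chars.strip cur = []
            · rw [if_neg (by simp [hne]), h2, pvStrTail_quote]
              simp [show pvWordChar '"' = false from rfl, pvEmit, hne]
            · rw [if_pos hne, h2, pvStrTail_quote]
              simp [show pvWordChar '"' = false from rfl, pvEmit, hne]
          · by_cases hsep : ch = ' ' ∨ ch = '\t' ∨ ch = ','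
            · have hB : pvWordChar ch = false := pvWordChar_sep_false (by tauto)
              rw [tokeniseA, if_neg (by simp [hsemi]), if_neg hq, if_pos ⟨hsep, rfl⟩]
              have hBrest : tokeniseB (ch :: rest) = tokeniseB rest := by
                rw [tokeniseB.eq_def]
                simp [hsemi, hsep]
              by_cases hne : PySem.Chars.strip cur = []
              · rw [if_neg (by simp [hne]), (ih rest hr).1 _ cur hcur]
                rw [List.takeWhile_cons_of_neg (by simp [hB]),
                  List.dropWhile_cons_of_neg (by simp [hB]), hBrest, tokeniseB_step rest,
                  pvStrip_append_of_nil hne, List.append_nil]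
                simp [pvEmit, hne]
              · rw [if_pos hne, (ih rest hr).1 _ [] (by simp)]
                rw [List.takeWhile_cons_of_neg (by simp [hB]),
                  List.dropWhile_cons_of_neg (by simp [hB]), hBrest, tokeniseB_step rest,
                  List.append_nil, List.nil_append]
                simp [pvEmit, hne]
            · -- word character
              have hw : pvWordChar ch = true := by
                push_neg at hsep
                simp [pvWordChar, hsemi, hq, hsep.1, hsep.2.1, hsep.2.2]
              rw [tokeniseA, if_neg (by simp [hsemi]), if_neg hq, if_neg (by simp [hsep])]
              rw [(ih rest hr).1 _ (cur ++ [ch]) (by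
                intro c hc
                rcases List.mem_append.mp hc with h | h
                · exact hcur c h
                · simp only [List.mem_singleton] at h; subst h; exact hw)]
              rw [List.takeWhile_cons_of_pos (by simp [hw]),
                List.dropWhile_cons_of_pos (by simp [hw])]
              simp
      · -- instr = true
        by_cases hq : ch = '"'
        · subst hq
          rw [tokeniseA, if_neg (by simp), if_pos rfl, if_pos rfl]
          rw [(ih rest hr).1 _ [] (by simp)]
          simp only [List.nil_append, List.append_assoc]
          rw [← tokeniseB_step rest]
          rw [pvStrTail, List.dropWhile_cons_of_neg (by simp),
            List.takeWhile_cons_of_neg (by simp)]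
          simp
        · rw [tokeniseA, if_neg (by simp), if_neg hq, if_neg (by simp)]
          rw [(ih rest hr).2, pvStrTail_cons hq]

-- ===== VERDICT (by name: the statement is the Claim_ definition above) =====
theorem tokenise_line_spec : Claim_equal_tokenise_line := by
  intro line _
  unfold Spec_tokenise_line tokenise_line tokenise_line_alt
  have h := (pvMain line.toList.length line.toList le_rfl).1 [] [] (by simp)
  rw [h, tokeniseB_step line.toList]
  simp
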